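-- pv_equiv track=rewrite | github.com/FrankNicoMol/AdventOfCode | 2023/day05.py | use_rules
-- ===== SOURCE A (Python) =====
-- def use_rules(inputs, lines):
--     positions = [-1] * 100
--     for line in lines:
--         r, v = to_range(line)
--         for i in range(len(r)):
--             positions[r[i]] = v + i
--     for i in range(len(positions)):
--         if positions[i] == -1:
--             for j in range(100):
--                 if j not in positions:
--                     positions[i] = j
--                     break
--     outputs = []
--     for i in inputs:
--         outputs.append(positions[i])
--     return outputs
--
-- def to_range(line):
--     vals = line.split(' ')
--     r = [int(vals[1]), int(vals[1])+int(vals[2])]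
--     val = int(vals[0])
--     return r, val
-- ===== SOURCE B (Python) =====
-- def to_range(line):
--     vals = line.split(' ')
--     r = [int(vals[1]), int(vals[1])+int(vals[2])]
--     val = int(vals[0])
--     return r, val
--
-- def use_rules(inputs, lines):
--     positions = [-1] * 100
--     for line in lines:
--         r, v = to_range(line)
--         for i, x in enumerate(r):
--             positions[x] = v + i
--     used = set(positions)
--     avail = [j for j in range(100) if j not in used]
--     for i in range(len(positions)):
--         if positions[i] == -1 and avail:
--             positions[i] = avail.pop(0)
--     return [positions[i] for i in inputs]
-- ===== Notes on version B (the rewrite author's own statement) =====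
-- stated objective: alternative
-- what changed: The gap-filling triple loop (for each -1 slot, rescan 0..99 against the whole positions list) is replaced by computing the ascending list of available values once (a set of used values plus one filter pass) and popping from it in a single pass over the slots.
import Mathlib
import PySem

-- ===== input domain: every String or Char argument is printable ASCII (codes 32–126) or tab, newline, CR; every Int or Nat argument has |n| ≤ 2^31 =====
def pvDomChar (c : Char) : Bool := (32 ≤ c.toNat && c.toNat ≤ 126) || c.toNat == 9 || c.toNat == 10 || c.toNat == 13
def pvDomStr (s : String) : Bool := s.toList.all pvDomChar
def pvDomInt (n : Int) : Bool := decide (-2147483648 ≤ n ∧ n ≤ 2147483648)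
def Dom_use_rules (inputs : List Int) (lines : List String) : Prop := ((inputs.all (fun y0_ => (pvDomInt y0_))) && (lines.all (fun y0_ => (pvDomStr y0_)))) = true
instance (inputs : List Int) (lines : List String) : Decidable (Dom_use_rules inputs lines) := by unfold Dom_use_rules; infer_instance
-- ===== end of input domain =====

-- B replaces A's gap-filling rescans (for each -1 slot, scan j=0..99 against the whole
-- positions list) by one precomputed ascending list of available values popped in a single pass.

-- shared helper: vals = line.split(' '); (int(vals[0]), int(vals[1]), int(vals[2])); none = any raise
def pvParse (line : String) : Option (Int × Int × Int) :=
  match PySem.Str.split? line " " with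
  | none => none
  | some vals =>
    match PySem.List.pyGet? vals 0, PySem.List.pyGet? vals 1, PySem.List.pyGet? vals 2 with
    | some s0, some s1, some s2 =>
      match PySem.Int.ofStr? s0, PySem.Int.ofStr? s1, PySem.Int.ofStr? s2 with
      | some a, some b, some c => some (a, b, c)
      | _, _, _ => none
    | _, _, _ => none

-- shared helper: to_range(line); ([], 0) only outside Pre_ (where Python raises)
def pvToRange (line : String) : List Int × Int :=
  match pvParse line with
  | some (a, b, c) => ([b, b + c], a)
  | none => ([], 0)

-- ===== PORT A =====
-- for line in lines: r,v = to_range(line); for i in range(len(r)): positions[r[i]] = v+i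
def pvLoop1A (ps0 : List Int) (lines : List String) : List Int :=
  lines.foldl (fun ps line =>
    let rv := pvToRange line
    (List.range rv.1.length).foldl
      (fun ps (i : Nat) => PySem.List.pySetD ps (PySem.List.pyGetD rv.1 (i : Int) 0) (rv.2 + (i : Int))) ps) ps0

-- for j in range(100): if j not in positions: … break  — the first free value
def pvFindFreeA (ps : List Int) : Option Int :=
  (PySem.List.pyRange 0 100 1).find? (fun j => !ps.contains j)

-- for i in range(len(positions)): if positions[i] == -1: positions[i] = first free value
def pvGapA (ps0 : List Int) : List Int :=
  (List.range ps0.length).foldl (fun ps i =>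
    if ps.getD i 0 = -1 then
      match pvFindFreeA ps with
      | some j => ps.set i j
      | none => ps
    else ps) ps0

def use_rules (inputs : List Int) (lines : List String) : List Int :=
  let positions := pvGapA (pvLoop1A (List.replicate 100 (-1)) lines)
  inputs.foldl (fun outputs i => outputs ++ [PySem.List.pyGetD positions i 0]) []

-- ===== PORT B =====
-- for i, x in enumerate(r): positions[x] = v + i
def pvLoop1B (ps0 : List Int) (lines : List String) : List Int :=
  lines.foldl (fun ps line =>
    let rv := pvToRange line
    (PySem.List.enumerate rv.1 0).foldl (fun ps p => PySem.List.pySetD ps p.2 (rv.2 + p.1)) ps) ps0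

-- used = set(positions); avail = [j for j in range(100) if j not in used];
-- for i in range(len(positions)): if positions[i] == -1 and avail: positions[i] = avail.pop(0)
def pvGapB (ps0 : List Int) : List Int :=
  let used := PySem.Set.ofList ps0
  let avail0 := (PySem.List.pyRange 0 100 1).filter (fun j => !used.contains j)
  ((List.range ps0.length).foldl (fun (st : List Int × List Int) i =>
      if st.1.getD i 0 = -1 then
        match st.2 with
        | j :: rest => (st.1.set i j, rest)
        | [] => st
      else st) (ps0, avail0)).1

def use_rules_alt (inputs : List Int) (lines : List String) : List Int :=
  let positions := pvGapB (pvLoop1B (List.replicate 100 (-1)) lines)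
  inputs.map (fun i => PySem.List.pyGetD positions i 0)

-- ===== PRECONDITION & SPEC =====
-- Pre_ = exactly the inputs where Python A returns: every line splits into ≥ 3 int()-parsable
-- fields with both written indices in [-100,100), and every queried input index is in [-100,100).
def pvLineOK (line : String) : Bool :=
  match pvParse line with
  | some (_, b, c) => decide (-100 ≤ b ∧ b < 100 ∧ -100 ≤ b + c ∧ b + c < 100)
  | none => false

def Pre_use_rules (inputs : List Int) (lines : List String) : Prop :=
  lines.all pvLineOK = true ∧ ∀ i ∈ inputs, -100 ≤ i ∧ i < 100

instance (inputs : List Int) (lines : List String) : Decidable (Pre_use_rules inputs lines) := by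
  unfold Pre_use_rules; infer_instance

def pvWitness_use_rules : List Int × List String := ([0, 5, -1], ["10 0 3", "50 20 2"])

def Spec_use_rules (inputs : List Int) (lines : List String) (out : List Int) : Prop := out = use_rules_alt inputs lines
instance (inputs : List Int) (lines : List String) (out : List Int) : Decidable (Spec_use_rules inputs lines out) := by unfold Spec_use_rules; infer_instance

-- ===== CLAIM (what is proved, stated in full; the proofs are below) =====
def Claim_equal_use_rules : Prop := ∀ (inputs : List Int) (lines : List String), Dom_use_rules inputs lines → Pre_use_rules inputs lines → Spec_use_rules inputs lines (use_rules inputs lines)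

-- ===== LEMMAS AND PROOFS =====

-- the candidate list B precomputes, as a function of the current positions
def pvAvailOf (ps : List Int) : List Int :=
  (PySem.List.pyRange 0 100 1).filter (fun j => !ps.contains j)

theorem pv_contains_ofList (ps : List Int) (j : Int) :
    ((PySem.Set.ofList ps).contains j) = ps.contains j := by
  rw [Bool.eq_iff_iff, PySem.Set.contains_iff, PySem.Set.mem_ofList]
  simp

theorem pv_findFree_eq_head (ps : List Int) : pvFindFreeA ps = (pvAvailOf ps).head? := by
  unfold pvFindFreeA pvAvailOf
  exact List.head?_filter.symm

-- inner loop of the first pass: enumerate-based fold = index-based fold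
theorem pv_inner_eq (r : List Int) (v : Int) (ps : List Int) :
    (PySem.List.enumerate r 0).foldl (fun ps p => PySem.List.pySetD ps p.2 (v + p.1)) ps
      = (List.range r.length).foldl
          (fun ps (i : Nat) => PySem.List.pySetD ps (PySem.List.pyGetD r (i : Int) 0) (v + (i : Int))) ps := by
  rw [PySem.List.enumerate_eq_map_pyRange r 0, List.foldl_map, PySem.List.pyRange_one]
  simp only [List.foldl_map, zero_add, PySem.List.len, Int.sub_zero, Int.toNat_natCast]

theorem pv_loop1_eq (lines : List String) (ps0 : List Int) :
    pvLoop1B ps0 lines = pvLoop1A ps0 lines := by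
  unfold pvLoop1B pvLoop1A
  induction lines generalizing ps0 with
  | nil => rfl
  | cons line rest ih =>
    simp only [List.foldl_cons]
    rw [pv_inner_eq]
    exact ih _

-- membership after writing j into a slot that held -1
theorem pv_mem_set_iff (ps : List Int) (i : Nat) (hi : i < ps.length)
    (hneg : ps[i] = -1) (j x : Int) (hx : x ≠ -1) :
    x ∈ ps.set i j ↔ x = j ∨ x ∈ ps := by
  have hset : i < (ps.set i j).length := by simpa using hi
  constructor
  · intro h
    rcases List.mem_or_eq_of_mem_set h with h' | h'
    · exact Or.inr h'
    · exact Or.inl h'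
  · intro h
    rcases h with rfl | h
    · have heq : (ps.set i x)[i]'(by simpa using hi) = x := List.getElem_set_self _
      exact List.mem_iff_getElem.mpr ⟨i, by simpa using hi, heq⟩
    · rcases List.mem_iff_getElem.mp h with ⟨k, hk, hke⟩
      have hki : i ≠ k := by
        intro he; subst he; rw [hke] at hneg; exact hx hneg
      have heq : (ps.set i j)[k]'(by simpa using hk) = x := by
        rw [List.getElem_set_ne hki]; exact hke
      exact List.mem_iff_getElem.mpr ⟨k, by simpa using hk, heq⟩

theorem pv_avail_set (ps : List Int) (i : Nat) (hi : i < ps.length)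
    (h1 : ps.getD i 0 = -1) (j : Int) (rest : List Int)
    (hA : pvAvailOf ps = j :: rest) :
    pvAvailOf (ps.set i j) = rest := by
  have hneg : ps[i] = -1 := by rwa [List.getD_eq_getElem ps 0 hi] at h1
  have hnodup : (pvAvailOf ps).Nodup :=
    List.Nodup.filter _ (PySem.List.nodup_pyRange_one 0 100)
  rw [hA] at hnodup
  have hjrest : j ∉ rest := (List.nodup_cons.mp hnodup).1
  unfold pvAvailOf at hA ⊢
  have hstep : (PySem.List.pyRange 0 100 1).filter (fun x => !(ps.set i j).contains x)
      = (PySem.List.pyRange 0 100 1).filter (fun x => (!(x == j)) && !ps.contains x) := by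
    apply List.filter_congr
    intro x hxmem
    have hx0 : (0 : Int) ≤ x := (PySem.List.mem_pyRange_one.mp hxmem).1
    have hxne : x ≠ -1 := by intro h; rw [h] at hx0; omega
    have hiff := pv_mem_set_iff ps i hi hneg j x hxne
    by_cases hxj : x = j
    · subst hxj
      have : x ∈ ps.set i x := hiff.mpr (Or.inl rfl)
      simp [this]
    · by_cases hxp : x ∈ ps
      · have : x ∈ ps.set i j := hiff.mpr (Or.inr hxp)
        simp [this, hxp]
      · have : x ∉ ps.set i j := by
          intro h; rcases hiff.mp h with h' | h'
          · exact hxj h'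
          · exact hxp h'
        simp [this, hxp, hxj]
  rw [hstep, ← List.filter_filter, hA]
  have : List.filter (fun x => !(x == j)) (j :: rest) = rest := by
    rw [List.filter_cons]
    simp only [beq_self_eq_true, Bool.not_true, Bool.false_eq_true, if_false]
    exact List.filter_eq_self.mpr (fun a ha => by
      simp only [Bool.not_eq_true', beq_eq_false_iff_ne]
      intro he; subst he; exact hjrest ha)
  rw [this]

-- one step of the gap-filling pass: B's pop agrees with A's rescan
theorem pv_step_eq (ps : List Int) (i : Nat) (hi : i < ps.length) :
    (if ps.getD i 0 = -1 then
        match pvAvailOf ps with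
        | j :: rest => (ps.set i j, rest)
        | [] => (ps, pvAvailOf ps)
      else (ps, pvAvailOf ps))
    = ((if ps.getD i 0 = -1 then
          match pvFindFreeA ps with
          | some j => ps.set i j
          | none => ps
        else ps),
        pvAvailOf (if ps.getD i 0 = -1 then
          match pvFindFreeA ps with
          | some j => ps.set i j
          | none => ps
        else ps)) := by
  by_cases h : ps.getD i 0 = -1
  · rw [pv_findFree_eq_head]
    cases hA : pvAvailOf ps with
    | nil =>
      simp only [if_pos h, hA, List.head?_nil]
    | cons j rest =>
      simp only [if_pos h, List.head?_cons]
      rw [pv_avail_set ps i hi h j rest hA]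
  · simp only [if_neg h]

theorem pv_length_stepA (ps : List Int) (i : Nat) :
    (if ps.getD i 0 = -1 then
        match pvFindFreeA ps with
        | some j => ps.set i j
        | none => ps
      else ps).length = ps.length := by
  split
  · cases pvFindFreeA ps <;> simp
  · rfl

theorem pv_gap_fold (idxs : List Nat) (ps : List Int) (h : ∀ i ∈ idxs, i < ps.length) :
    idxs.foldl (fun (st : List Int × List Int) i =>
        if st.1.getD i 0 = -1 then
          match st.2 with
          | j :: rest => (st.1.set i j, rest)
          | [] => st
        else st) (ps, pvAvailOf ps)
      = (idxs.foldl (fun ps i =>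
          if ps.getD i 0 = -1 then
            match pvFindFreeA ps with
            | some j => ps.set i j
            | none => ps
          else ps) ps,
        pvAvailOf (idxs.foldl (fun ps i =>
          if ps.getD i 0 = -1 then
            match pvFindFreeA ps with
            | some j => ps.set i j
            | none => ps
          else ps) ps)) := by
  induction idxs generalizing ps with
  | nil => rfl
  | cons i rest ih =>
    simp only [List.foldl_cons]
    have hi : i < ps.length := h i (List.mem_cons_self)
    have hstep := pv_step_eq ps i hi
    rw [hstep]
    exact ih _ (fun k hk => by
      rw [pv_length_stepA]; exact h k (List.mem_cons_of_mem _ hk))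

theorem pv_gap_eq (ps0 : List Int) : pvGapB ps0 = pvGapA ps0 := by
  unfold pvGapB pvGapA
  have havail : (PySem.List.pyRange 0 100 1).filter
      (fun j => !(PySem.Set.ofList ps0).contains j) = pvAvailOf ps0 := by
    unfold pvAvailOf
    exact List.filter_congr (fun x _ => by rw [pv_contains_ofList])
  simp only [havail]
  rw [pv_gap_fold (List.range ps0.length) ps0 (fun i hi => List.mem_range.mp hi)]

-- ===== VERDICT (by name: the statement is the Claim_ definition above) =====
theorem use_rules_spec : Claim_equal_use_rules := by
  intro inputs lines _ _
  unfold Spec_use_rules use_rules use_rules_alt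
  rw [pv_loop1_eq, pv_gap_eq, PySem.List.foldl_append_singleton_eq_map]
  simp
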